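-- pv_equiv track=rewrite | github.com/dima137/GU_git | lib/multi_fgl_utils.py | trim2depth
-- ===== SOURCE A (Python) =====
-- def max_node_length(tree):
--     nmax = 0
--     for node in tree:
--         nmax = max(nmax, len(node))
--     return nmax
--
-- def get_subtree(node, tree):
--     return [nd for nd in tree if nd.startswith(node)]
--
-- def trim2depth(tree_cat_dict, depth=None):
--     tree = tree_cat_dict.keys()
--     if depth is None or max_node_length(tree) <= depth + 1:
--         return tree_cat_dict
--     else:
--         tree_cat_dict_res = tree_cat_dict.copy()
--         while max_node_length(tree) > depth + 1:
--             for node in tree: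
--                 if len(node) > depth + 1:
--                     new_node = node[:depth + 1]
--                     subtree = get_subtree(new_node, tree)
--                     new_classes = []
--                     for leaf in subtree:
--                         new_classes.extend(tree_cat_dict_res.pop(leaf))
--                     tree_cat_dict_res[new_node] = new_classes
--                     tree = tree_cat_dict_res.keys()
--                     break
--     return tree_cat_dict_res
-- ===== SOURCE B (Python) =====
-- def trim2depth(tree_cat_dict, depth=None):
--     if depth is None:
--         return tree_cat_dict
--     p = depth + 1
--     if all(len(k) <= p for k in tree_cat_dict):
--         return tree_cat_dict
--     # group prefixes, ordered by first occurrence of a too-long node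
--     order = []
--     for k in tree_cat_dict:
--         if len(k) > p and k[:p] not in order:
--             order.append(k[:p])
--     res = {k: v for k, v in tree_cat_dict.items()
--            if not (len(k) >= p and k[:p] in order)}
--     for g in order:
--         classes = []
--         for k, v in tree_cat_dict.items():
--             if len(k) >= p and k[:p] == g:
--                 classes.extend(v)
--         res[g] = classes
--     return res
-- ===== Notes on version B (the rewrite author's own statement) =====
-- stated objective: faster
-- what changed: Replaces A's destructive fixpoint loop (rescan the dict for the first over-long key, pop its whole prefix group, append the merged node, repeat until no key is too long) by a single grouping pass: compute the ordered list of length-(depth+1) prefixes of over-long keys, keep ungrouped entries in place, and append each group's concatenated class list once.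
import Mathlib
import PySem

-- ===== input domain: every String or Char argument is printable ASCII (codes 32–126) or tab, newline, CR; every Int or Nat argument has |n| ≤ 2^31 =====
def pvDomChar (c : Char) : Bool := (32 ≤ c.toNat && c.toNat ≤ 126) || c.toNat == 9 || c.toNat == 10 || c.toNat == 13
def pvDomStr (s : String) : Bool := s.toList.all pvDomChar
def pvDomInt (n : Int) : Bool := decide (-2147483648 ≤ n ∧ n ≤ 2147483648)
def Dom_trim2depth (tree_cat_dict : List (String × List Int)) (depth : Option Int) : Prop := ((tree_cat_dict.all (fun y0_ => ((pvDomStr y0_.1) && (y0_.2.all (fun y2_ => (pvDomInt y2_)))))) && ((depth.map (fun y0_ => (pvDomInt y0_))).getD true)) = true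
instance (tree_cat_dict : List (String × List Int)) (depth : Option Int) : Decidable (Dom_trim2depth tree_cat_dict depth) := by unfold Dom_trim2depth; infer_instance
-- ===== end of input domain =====

-- B replaces A's destructive fixpoint loop (rescan for the first over-long key, pop its prefix
-- group, append the merged node, repeat) by a single grouping pass over the keys; the objective
-- is a structurally different (in practice faster) algorithm with the same return value.


-- ===== PORT A =====
-- max_node_length(tree)
def pvMaxNodeLength (tree : List String) : Int :=
  tree.foldl (fun nmax node => max nmax (PySem.Str.len node)) 0

-- get_subtree(node, tree)
def pvGetSubtree (node : String) (tree : List String) : List String :=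
  tree.filter (fun nd => PySem.Str.startswith nd node)

-- dict.pop(leaf) on the unique-keyed association list: value of the (first) entry with that key,
-- and the list with that entry removed; the KeyError branch is unreachable in A (leaf is always
-- drawn from the dict's keys), so the .getD default can never be returned.
def pvPop (res : List (String × List Int)) (leaf : String) : List Int × List (String × List Int) :=
  (((res.find? (fun kv => kv.1 == leaf)).map Prod.snd).getD [], res.eraseP (fun kv => kv.1 == leaf))

-- A's while-loop. fuel bounds the number of iterations: on every input Pre_ admits, each round
-- removes at least one over-long key (lemma pv_lc_step below), so the initial dict size is
-- enough fuel and the port computes exactly what the Python loop returns there.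
def pvLoopA (p : Int) : Nat → List (String × List Int) → List (String × List Int)
  | 0, res => res
  | fuel + 1, res =>
    if p < pvMaxNodeLength (res.map Prod.fst) then
      match (res.map Prod.fst).find? (fun node => decide (p < PySem.Str.len node)) with
      | some node =>
        let newNode := PySem.Str.slice node none (some p)
        let subtree := pvGetSubtree newNode (res.map Prod.fst)
        let st := subtree.foldl
          (fun (st : List Int × List (String × List Int)) leaf =>
            let pr := pvPop st.2 leaf
            (st.1 ++ pr.1, pr.2)) (([] : List Int), res)
        -- res[new_node] = new_classes: new_node was just popped, so the assignment appends
        pvLoopA p fuel (st.2 ++ [(newNode, st.1)])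
      | none => res  -- unreachable under Pre_ (0 ≤ p and max > p give an over-long node);
                     -- in Python this case loops forever and only depth ≤ -2 reaches it
    else res

def trim2depth (tree_cat_dict : List (String × List Int)) (depth : Option Int) : List (String × List Int) :=
  match depth with
  | none => tree_cat_dict
  | some d =>
    if pvMaxNodeLength (tree_cat_dict.map Prod.fst) ≤ d + 1 then tree_cat_dict
    else pvLoopA (d + 1) tree_cat_dict.length tree_cat_dict

-- ===== PORT B =====
-- k[:p]
def pvPrefix (p : Int) (k : String) : String := PySem.Str.slice k none (some p)

def pvOrderB (p : Int) (l : List (String × List Int)) : List String :=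
  l.foldl (fun acc kv =>
    if decide (p < PySem.Str.len kv.1) && !(acc.contains (pvPrefix p kv.1)) then
      acc ++ [pvPrefix p kv.1]
    else acc) []
def pvKeptB (p : Int) (ord : List String) (l : List (String × List Int)) : List (String × List Int) :=
  l.filter (fun kv => !(decide (p ≤ PySem.Str.len kv.1) && ord.contains (pvPrefix p kv.1)))
def pvGroupB (p : Int) (l : List (String × List Int)) (g : String) : List Int :=
  (l.filter (fun kv => decide (p ≤ PySem.Str.len kv.1) && (pvPrefix p kv.1 == g))).foldl
    (fun classes kv => classes ++ kv.2) []


def trim2depth_alt (tree_cat_dict : List (String × List Int)) (depth : Option Int) : List (String × List Int) :=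
  match depth with
  | none => tree_cat_dict
  | some d =>
    let p := d + 1
    if tree_cat_dict.all (fun kv => decide (PySem.Str.len kv.1 ≤ p)) then tree_cat_dict
    else
      -- each res[g] = classes of Source B appends: g is never a key of the comprehension
      pvKeptB p (pvOrderB p tree_cat_dict) tree_cat_dict
        ++ (pvOrderB p tree_cat_dict).map (fun g => (g, pvGroupB p tree_cat_dict g))

-- ===== PRECONDITION & SPEC =====
-- Pre_ excludes (a) association lists with duplicate keys, which cannot arise from A's Python
-- dict argument, and (b) depth ≤ -2, on which A's while-loop never terminates (A diverges and
-- returns nothing).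
def Pre_trim2depth (tree_cat_dict : List (String × List Int)) (depth : Option Int) : Prop :=
  (tree_cat_dict.map Prod.fst).Nodup ∧ (∀ d : Int, depth = some d → -1 ≤ d)
instance (tree_cat_dict : List (String × List Int)) (depth : Option Int) : Decidable (Pre_trim2depth tree_cat_dict depth) := by unfold Pre_trim2depth; infer_instance

def pvWitness_trim2depth : (List (String × List Int)) × Option Int :=
  ([("ab", [1]), ("a", [2]), ("b", [])], some 0)

def Spec_trim2depth (tree_cat_dict : List (String × List Int)) (depth : Option Int) (out : List (String × List Int)) : Prop := out = trim2depth_alt tree_cat_dict depth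
instance (tree_cat_dict : List (String × List Int)) (depth : Option Int) (out : List (String × List Int)) : Decidable (Spec_trim2depth tree_cat_dict depth out) := by unfold Spec_trim2depth; infer_instance

-- ===== CLAIM (what is proved, stated in full; the proofs are below) =====
def Claim_equal_trim2depth : Prop := ∀ (tree_cat_dict : List (String × List Int)) (depth : Option Int), Dom_trim2depth tree_cat_dict depth → Pre_trim2depth tree_cat_dict depth → Spec_trim2depth tree_cat_dict depth (trim2depth tree_cat_dict depth)

-- ===== LEMMAS AND PROOFS =====

lemma pvPrefix_toList (p : Int) (hp : 0 ≤ p) (k : String) :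
    (pvPrefix p k).toList = k.toList.take p.toNat := by
  simp [pvPrefix, PySem.List.slice_to _ hp]

lemma pvLen_eq (k : String) : PySem.Str.len k = (k.toList.length : Int) := by
  simp [PySem.Str.len_eq]

lemma pv_sw_iff (p : Int) (hp : 0 ≤ p) (g : String) (hg : g.toList.length = p.toNat)
    (k : String) :
    PySem.Str.startswith k g = true ↔ (p ≤ PySem.Str.len k ∧ pvPrefix p k = g) := by
  rw [PySem.Str.startswith_eq, PySem.Chars.startswith_iff]
  constructor
  · intro h
    have htake := List.prefix_iff_eq_take.mp h
    have hlen : g.toList.length ≤ k.toList.length := h.length_le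
    refine ⟨?_, ?_⟩
    · rw [pvLen_eq]; omega
    · rw [← String.toList_inj, pvPrefix_toList p hp, ← hg, ← htake]
  · rintro ⟨hlen, hpfx⟩
    rw [← String.toList_inj, pvPrefix_toList p hp] at hpfx
    rw [List.prefix_iff_eq_take, hg, hpfx]

lemma pv_pfx_self (p : Int) (hp : 0 ≤ p) (g : String) (hg : g.toList.length = p.toNat) :
    pvPrefix p g = g := by
  rw [← String.toList_inj, pvPrefix_toList p hp, ← hg, List.take_length]

lemma pv_len_pfx (p : Int) (hp : 0 ≤ p) (k : String) (hk : p ≤ PySem.Str.len k) :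
    (pvPrefix p k).toList.length = p.toNat := by
  rw [pvPrefix_toList p hp, List.length_take]
  rw [pvLen_eq] at hk
  omega


lemma pv_lt_foldl_max (q : Int) (l : List String) : ∀ a : Int,
    q < l.foldl (fun nmax node => max nmax (PySem.Str.len node)) a ↔
      q < a ∨ ∃ k ∈ l, q < PySem.Str.len k := by
  induction l with
  | nil => simp
  | cons x t ih =>
    intro a
    simp only [List.foldl_cons, ih, lt_max_iff, List.mem_cons]
    constructor
    · rintro (h | h)
      · rcases h with h | h
        · exact Or.inl h
        · exact Or.inr ⟨x, Or.inl rfl, h⟩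
      · rcases h with ⟨k, hk, hq⟩
        exact Or.inr ⟨k, Or.inr hk, hq⟩
    · rintro (h | ⟨k, hk | hk, hq⟩)
      · exact Or.inl (Or.inl h)
      · exact Or.inl (Or.inr (hk ▸ hq))
      · exact Or.inr ⟨k, hk, hq⟩

-- ordered dedup
def pvDedup : List String → List String
  | [] => []
  | x :: xs => x :: (pvDedup xs).filter (fun y => y != x)

lemma pv_addAll_eq (l : List String) : ∀ acc : List String,
    l.foldl (fun acc x => if acc.contains x then acc else acc ++ [x]) acc =
      acc ++ (pvDedup l).filter (fun y => !(acc.contains y)) := by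
  induction l with
  | nil => simp [pvDedup]
  | cons x t ih =>
    intro acc
    simp only [List.foldl_cons, pvDedup, List.filter_cons]
    by_cases hx : x ∈ acc
    · rw [if_pos (List.contains_iff_mem.mpr hx), if_neg (by simp [hx]), ih acc,
        List.filter_filter]
      congr 1
      apply List.filter_congr
      intro y _
      by_cases hyx : y = x
      · subst hyx; simp [hx]
      · simp [hyx]
    · rw [if_neg (by simp [hx]), if_pos (by simp [hx]), ih (acc ++ [x]),
        List.filter_filter, List.append_assoc]
      congr 1
      simp only [List.singleton_append, List.cons.injEq, true_and]
      apply List.filter_congr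
      intro y _
      by_cases hyx : y = x
      · subst hyx; simp
      · simp [hyx, List.contains_append]

lemma pv_dedup_filter (q : String → Bool) (l : List String) :
    pvDedup (l.filter q) = (pvDedup l).filter q := by
  induction l with
  | nil => simp [pvDedup]
  | cons x t ih =>
    rw [List.filter_cons]
    by_cases hq : q x = true
    · rw [if_pos hq]
      show x :: (pvDedup (t.filter q)).filter (fun y => y != x) =
        (x :: (pvDedup t).filter (fun y => y != x)).filter q
      rw [ih, List.filter_cons, if_pos hq, List.filter_filter, List.filter_filter]
      congr 1
      apply List.filter_congr
      intro y _
      exact Bool.and_comm _ _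
    · rw [if_neg hq, ih]
      show (pvDedup t).filter q = (x :: (pvDedup t).filter (fun y => y != x)).filter q
      rw [List.filter_cons, if_neg hq, List.filter_filter]
      apply List.filter_congr
      intro y _
      by_cases hyx : y = x
      · subst hyx; simp [hq]
      · simp [hyx]

-- ===== proof-layer defs =====
def pvLongB (p : Int) (kv : String × List Int) : Bool := decide (p < PySem.Str.len kv.1)
def pvSwB (p : Int) (g : String) (kv : String × List Int) : Bool := PySem.Str.startswith kv.1 g
def pvLongPfx (p : Int) (l : List (String × List Int)) : List String :=
  (l.filter (pvLongB p)).map (fun kv => pvPrefix p kv.1)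
def pvCore (p : Int) (l : List (String × List Int)) : List (String × List Int) :=
  pvKeptB p (pvOrderB p l) l ++ (pvOrderB p l).map (fun g => (g, pvGroupB p l g))
def pvStep (p : Int) (g : String) (l : List (String × List Int)) : List (String × List Int) :=
  l.filter (fun kv => !(pvSwB p g kv)) ++
    [(g, ((l.filter (pvSwB p g)).map Prod.snd).flatten)]
def pvLC (p : Int) (l : List (String × List Int)) : Nat := (l.filter (pvLongB p)).length

-- order as ordered dedup of the long-prefix list
lemma pv_orderB_eq (p : Int) (l : List (String × List Int)) :
    pvOrderB p l = pvDedup (pvLongPfx p l) := by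
  have h1 : pvOrderB p l =
      l.foldl (fun acc kv => if pvLongB p kv then
        (if acc.contains (pvPrefix p kv.1) then acc else acc ++ [pvPrefix p kv.1]) else acc) [] := by
    unfold pvOrderB
    congr 1
    funext acc kv
    show (if (pvLongB p kv && !(acc.contains (pvPrefix p kv.1))) = true
        then acc ++ [pvPrefix p kv.1] else acc) =
      (if pvLongB p kv = true
        then (if acc.contains (pvPrefix p kv.1) = true then acc else acc ++ [pvPrefix p kv.1])
        else acc)
    cases hL : pvLongB p kv <;> cases hC : acc.contains (pvPrefix p kv.1) <;> simp [hL, hC]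
  rw [h1, ← List.foldl_filter]
  have h2 := pv_addAll_eq ((l.filter (pvLongB p)).map (fun kv => pvPrefix p kv.1)) []
  rw [List.foldl_map] at h2
  simpa [pvLongPfx] using h2

lemma pv_sw_false_of (p : Int) (hp : 0 ≤ p) (g : String) (hg : g.toList.length = p.toNat)
    (kv : String × List Int) (h : ¬(p ≤ PySem.Str.len kv.1 ∧ pvPrefix p kv.1 = g)) :
    pvSwB p g kv = false := by
  cases hs : pvSwB p g kv
  · rfl
  · exact absurd ((pv_sw_iff p hp g hg kv.1).mp (by simpa [pvSwB] using hs)) h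

lemma pv_sw_eq_bool (p : Int) (hp : 0 ≤ p) (g : String) (hg : g.toList.length = p.toNat)
    (kv : String × List Int) :
    pvSwB p g kv = (decide (p ≤ PySem.Str.len kv.1) && (pvPrefix p kv.1 == g)) := by
  by_cases h1 : p ≤ PySem.Str.len kv.1
  · rw [decide_eq_true h1, Bool.true_and]
    by_cases h2 : pvPrefix p kv.1 = g
    · have ht : pvSwB p g kv = true := by
        simpa [pvSwB] using (pv_sw_iff p hp g hg kv.1).mpr ⟨h1, h2⟩
      rw [ht, h2, beq_self_eq_true]
    · rw [pv_sw_false_of p hp g hg kv (by tauto)]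
      exact (beq_eq_false_iff_ne.mpr h2).symm
  · rw [pv_sw_false_of p hp g hg kv (by tauto), decide_eq_false h1, Bool.false_and]

-- no over-long key: the core is the identity
lemma pv_core_id (p : Int) (l : List (String × List Int))
    (h : ∀ kv ∈ l, pvLongB p kv = false) : pvCore p l = l := by
  have hlp : pvLongPfx p l = [] := by
    unfold pvLongPfx
    rw [List.filter_eq_nil_iff.mpr (by intro a ha; simp [h a ha]), List.map_nil]
  unfold pvCore
  rw [pv_orderB_eq, hlp]
  simp [pvDedup, pvKeptB]

lemma pv_g_not_long (p : Int) (hp : 0 ≤ p) (g : String) (hg : g.toList.length = p.toNat)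
    (x : List Int) : pvLongB p (g, x) = false :=
  decide_eq_false (by rw [pvLen_eq]; show ¬ p < (g.toList.length : Int); rw [hg]; omega)

lemma pv_sw_self (p : Int) (hp : 0 ≤ p) (g : String) (hg : g.toList.length = p.toNat)
    (x : List Int) : pvSwB p g (g, x) = true := by
  rw [pv_sw_eq_bool p hp g hg]
  have h1 : p ≤ PySem.Str.len g := by rw [pvLen_eq, hg]; omega
  rw [decide_eq_true h1, pv_pfx_self p hp g hg]
  simp

lemma pv_ord_step (p : Int) (hp : 0 ≤ p) (l l₁ l₂ : List (String × List Int))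
    (kv : String × List Int) (hdec : l = l₁ ++ kv :: l₂)
    (h₁ : ∀ x ∈ l₁, pvLongB p x = false) (hkv : pvLongB p kv = true) :
    pvOrderB p l = pvPrefix p kv.1 :: pvOrderB p (pvStep p (pvPrefix p kv.1) l) ∧
      ∀ h ∈ pvOrderB p (pvStep p (pvPrefix p kv.1) l), h ≠ pvPrefix p kv.1 := by
  set g := pvPrefix p kv.1 with hgdef
  have hlong : p < PySem.Str.len kv.1 := of_decide_eq_true hkv
  have hg : g.toList.length = p.toNat := pv_len_pfx p hp kv.1 (le_of_lt hlong)
  have ha : pvLongPfx p l = g :: pvLongPfx p l₂ := by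
    unfold pvLongPfx
    rw [hdec, List.filter_append, List.filter_cons, if_pos hkv,
      List.filter_eq_nil_iff.mpr (by intro a haa; simp [h₁ a haa]), List.nil_append,
      List.map_cons]
  have hb : pvLongPfx p (pvStep p g l) = (pvLongPfx p l).filter (fun y => y != g) := by
    unfold pvStep pvLongPfx
    rw [List.filter_append]
    have h0 : List.filter (pvLongB p)
        [(g, ((l.filter (pvSwB p g)).map Prod.snd).flatten)] = [] := by
      simp [pv_g_not_long p hp g hg]
    rw [h0, List.append_nil, List.filter_filter, List.filter_map, List.filter_filter]
    congr 1
    apply List.filter_congr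
    intro x _
    cases hx : pvLongB p x
    · simp
    · rw [pv_sw_eq_bool p hp g hg x,
        decide_eq_true (le_of_lt (of_decide_eq_true hx))]
      cases hpg : (pvPrefix p x.1 == g) <;> simp [bne, hpg]
  have hstep : pvOrderB p (pvStep p g l) =
      (pvDedup (pvLongPfx p l₂)).filter (fun y => y != g) := by
    rw [pv_orderB_eq, hb, pv_dedup_filter, ha]
    show (g :: (pvDedup (pvLongPfx p l₂)).filter (fun y => y != g)).filter (fun y => y != g) = _
    rw [List.filter_cons, if_neg (by simp), List.filter_filter]
    apply List.filter_congr
    intro y _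
    exact Bool.and_self _
  refine ⟨?_, ?_⟩
  · rw [pv_orderB_eq, ha, hstep]
    rfl
  · rw [hstep]
    intro h hh
    have := (List.mem_filter.mp hh).2
    simpa using this

lemma pv_kept_step (p : Int) (hp : 0 ≤ p) (g : String) (hg : g.toList.length = p.toNat)
    (l : List (String × List Int)) (ord' : List String) (hng : g ∉ ord') :
    pvKeptB p ord' (pvStep p g l) =
      pvKeptB p (g :: ord') l ++ [(g, ((l.filter (pvSwB p g)).map Prod.snd).flatten)] := by
  unfold pvKeptB pvStep
  rw [List.filter_append]
  congr 1
  · rw [List.filter_filter]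
    apply List.filter_congr
    intro kv _
    rw [pv_sw_eq_bool p hp g hg kv, List.contains_cons]
    cases hd : decide (p ≤ PySem.Str.len kv.1) <;>
      cases hb : (pvPrefix p kv.1 == g) <;>
        cases hc : ord'.contains (pvPrefix p kv.1) <;> simp [hd, hb, hc]
  · have hcg : ord'.contains g = false := by
      cases h : ord'.contains g
      · rfl
      · exact absurd (List.contains_iff_mem.mp h) hng
    have hpfx : pvPrefix p g = g := pv_pfx_self p hp g hg
    simp [hpfx, hcg, hng]

lemma pv_foldl_append (m : List (String × List Int)) : ∀ acc : List Int,
    m.foldl (fun classes kv => classes ++ kv.2) acc = acc ++ (m.map Prod.snd).flatten := by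
  induction m with
  | nil => simp
  | cons kv t ih =>
    intro acc
    rw [List.foldl_cons, ih, List.map_cons, List.flatten_cons, List.append_assoc]

lemma pv_group_g (p : Int) (hp : 0 ≤ p) (g : String) (hg : g.toList.length = p.toNat)
    (l : List (String × List Int)) :
    pvGroupB p l g = ((l.filter (pvSwB p g)).map Prod.snd).flatten := by
  unfold pvGroupB
  have hfeq : l.filter (fun kv => decide (p ≤ PySem.Str.len kv.1) && (pvPrefix p kv.1 == g)) =
      l.filter (pvSwB p g) := by
    apply List.filter_congr
    intro kv _
    exact (pv_sw_eq_bool p hp g hg kv).symm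
  rw [hfeq, pv_foldl_append, List.nil_append]

lemma pv_group_step (p : Int) (hp : 0 ≤ p) (g : String) (hg : g.toList.length = p.toNat)
    (l : List (String × List Int)) (h : String) (hne : h ≠ g) :
    pvGroupB p (pvStep p g l) h = pvGroupB p l h := by
  have hfe : (pvStep p g l).filter
        (fun kv => decide (p ≤ PySem.Str.len kv.1) && (pvPrefix p kv.1 == h)) =
      l.filter (fun kv => decide (p ≤ PySem.Str.len kv.1) && (pvPrefix p kv.1 == h)) := by
    unfold pvStep
    rw [List.filter_append]
    have h1 : List.filter (fun kv => decide (p ≤ PySem.Str.len kv.1) && (pvPrefix p kv.1 == h))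
        [(g, ((l.filter (pvSwB p g)).map Prod.snd).flatten)] = [] := by
      have : (pvPrefix p g == h) = false :=
        beq_eq_false_iff_ne.mpr (by rw [pv_pfx_self p hp g hg]; exact Ne.symm hne)
      simp [this]
    rw [h1, List.append_nil, List.filter_filter]
    apply List.filter_congr
    intro kv _
    rw [pv_sw_eq_bool p hp g hg kv]
    cases hd : decide (p ≤ PySem.Str.len kv.1) <;> cases hbh : (pvPrefix p kv.1 == h)
    · simp
    · simp
    · simp
    · have hbg : (pvPrefix p kv.1 == g) = false := by
        rw [beq_iff_eq] at hbh
        exact beq_eq_false_iff_ne.mpr (by rw [hbh]; exact hne)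
      simp [hbg]
  unfold pvGroupB
  rw [hfe]

lemma pv_core_step (p : Int) (hp : 0 ≤ p) (l l₁ l₂ : List (String × List Int))
    (kv : String × List Int) (hdec : l = l₁ ++ kv :: l₂)
    (h₁ : ∀ x ∈ l₁, pvLongB p x = false) (hkv : pvLongB p kv = true) :
    pvCore p (pvStep p (pvPrefix p kv.1) l) = pvCore p l := by
  set g := pvPrefix p kv.1 with hgdef
  have hlong : p < PySem.Str.len kv.1 := of_decide_eq_true hkv
  have hg : g.toList.length = p.toNat := pv_len_pfx p hp kv.1 (le_of_lt hlong)
  obtain ⟨hord, hng⟩ := pv_ord_step p hp l l₁ l₂ kv hdec h₁ hkv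
  have hngm : g ∉ pvOrderB p (pvStep p g l) := fun hh => (hng g hh) rfl
  unfold pvCore
  rw [hord, pv_kept_step p hp g hg l _ hngm, List.map_cons,
    pv_group_g p hp g hg l, List.append_assoc, List.singleton_append]
  congr 2
  apply List.map_congr_left
  intro h hh
  rw [pv_group_step p hp g hg l h (hng h hh)]

lemma pv_filter_imp_le {α : Type} (a b : α → Bool) (l : List α)
    (h : ∀ x, a x = true → b x = true) :
    (l.filter a).length ≤ (l.filter b).length := by
  induction l with
  | nil => simp
  | cons x t ih =>
    by_cases hax : a x = true
    · rw [List.filter_cons, if_pos hax, List.filter_cons, if_pos (h x hax)]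
      simpa using ih
    · rw [List.filter_cons, if_neg hax]
      by_cases hbx : b x = true
      · rw [List.filter_cons, if_pos hbx]
        exact le_trans ih (by simp)
      · rw [List.filter_cons, if_neg hbx]
        exact ih

lemma pv_length_filter_lt {α : Type} (a c : α → Bool) (l : List α) (x : α) (hx : x ∈ l)
    (hax : a x = true) (hcx : c x = false) (himp : ∀ y, c y = true → a y = true) :
    (l.filter c).length < (l.filter a).length := by
  induction l with
  | nil => cases hx
  | cons y t ih =>
    rcases List.mem_cons.mp hx with rfl | hxt
    · rw [List.filter_cons, if_neg (by simp [hcx]), List.filter_cons, if_pos hax]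
      exact Nat.lt_succ_of_le (pv_filter_imp_le c a t himp)
    · by_cases hcy : c y = true
      · rw [List.filter_cons, if_pos hcy, List.filter_cons, if_pos (himp y hcy)]
        simpa using ih hxt
      · rw [List.filter_cons, if_neg hcy]
        by_cases hay : a y = true
        · rw [List.filter_cons, if_pos hay]
          exact Nat.lt_succ_of_lt (ih hxt)
        · rw [List.filter_cons, if_neg hay]
          exact ih hxt

lemma pv_lc_step (p : Int) (hp : 0 ≤ p) (g : String) (hg : g.toList.length = p.toNat)
    (l : List (String × List Int)) (kv : String × List Int) (hmem : kv ∈ l)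
    (hkv : pvLongB p kv = true) (hsw : pvSwB p g kv = true) :
    pvLC p (pvStep p g l) < pvLC p l := by
  unfold pvLC pvStep
  rw [List.filter_append]
  have h0 : List.filter (pvLongB p)
      [(g, ((l.filter (pvSwB p g)).map Prod.snd).flatten)] = [] := by
    simp [pv_g_not_long p hp g hg]
  rw [h0, List.append_nil, List.filter_filter]
  exact pv_length_filter_lt (pvLongB p) _ l kv hmem hkv (by simp [hsw])
    (fun y hy => by simp only [Bool.and_eq_true] at hy; exact hy.1)

lemma pv_nodup_step (p : Int) (hp : 0 ≤ p) (g : String) (hg : g.toList.length = p.toNat)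
    (l : List (String × List Int)) (hnd : (l.map Prod.fst).Nodup) :
    ((pvStep p g l).map Prod.fst).Nodup := by
  unfold pvStep
  rw [List.map_append, List.nodup_append]
  refine ⟨hnd.sublist (List.filter_sublist.map Prod.fst), by simp, ?_⟩
  intro a ha b hb
  have hbg : b = g := by simpa using hb
  intro hab
  rcases List.mem_map.mp ha with ⟨kv', hkv', hfst⟩
  have hswt : pvSwB p g kv' = true := by
    show PySem.Str.startswith kv'.1 g = true
    rw [hfst, hab, hbg]
    exact pv_sw_self p hp g hg []
  have hflt := (List.mem_filter.mp hkv').2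
  rw [hswt] at hflt
  exact absurd hflt (by simp)

lemma pv_max_iff (p : Int) (hp : 0 ≤ p) (l : List (String × List Int)) :
    p < pvMaxNodeLength (l.map Prod.fst) ↔ ∃ kv ∈ l, pvLongB p kv = true := by
  unfold pvMaxNodeLength
  rw [pv_lt_foldl_max]
  constructor
  · rintro (h | ⟨k, hk, hq⟩)
    · exact absurd h (by omega)
    · rcases List.mem_map.mp hk with ⟨kv, hm, rfl⟩
      exact ⟨kv, hm, decide_eq_true hq⟩
  · rintro ⟨kv, hm, hl⟩
    exact Or.inr ⟨kv.1, List.mem_map_of_mem hm, of_decide_eq_true hl⟩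

lemma pv_fold_pop_cons (sub : List String) :
    ∀ (kv : String × List Int) (t : List (String × List Int)) (acc : List Int),
    kv.1 ∉ sub →
    sub.foldl (fun (st : List Int × List (String × List Int)) leaf =>
        let pr := pvPop st.2 leaf
        (st.1 ++ pr.1, pr.2)) (acc, kv :: t) =
      ((sub.foldl (fun (st : List Int × List (String × List Int)) leaf =>
        let pr := pvPop st.2 leaf
        (st.1 ++ pr.1, pr.2)) (acc, t)).1,
       kv :: (sub.foldl (fun (st : List Int × List (String × List Int)) leaf =>
        let pr := pvPop st.2 leaf
        (st.1 ++ pr.1, pr.2)) (acc, t)).2) := by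
  induction sub with
  | nil => intro kv t acc _; rfl
  | cons s ss ih =>
    intro kv t acc hmem
    have hne : (kv.1 == s) = false :=
      beq_eq_false_iff_ne.mpr (fun h => hmem (h ▸ List.mem_cons_self))
    rw [List.foldl_cons, List.foldl_cons]
    have hpop : pvPop (kv :: t) s = ((pvPop t s).1, kv :: (pvPop t s).2) := by
      unfold pvPop
      rw [List.find?_cons_of_neg (by simp [hne]), List.eraseP_cons_of_neg (by simp [hne])]
    rw [hpop]
    exact ih kv (pvPop t s).2 (acc ++ (pvPop t s).1)
      (fun h => hmem (List.mem_cons_of_mem _ h))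

lemma pv_fold_pop_filter (q : String → Bool) :
    ∀ (l : List (String × List Int)) (acc : List Int), (l.map Prod.fst).Nodup →
    ((l.map Prod.fst).filter q).foldl (fun (st : List Int × List (String × List Int)) leaf =>
        let pr := pvPop st.2 leaf
        (st.1 ++ pr.1, pr.2)) (acc, l) =
      (acc ++ ((l.filter (fun kv => q kv.1)).map Prod.snd).flatten,
       l.filter (fun kv => !(q kv.1))) := by
  intro l
  induction l with
  | nil => intro acc _; simp
  | cons kv t ih =>
    intro acc hnd
    rw [List.map_cons, List.filter_cons]
    by_cases hq : q kv.1 = true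
    · rw [if_pos hq, List.foldl_cons]
      have hpop : pvPop (kv :: t) kv.1 = (kv.2, t) := by
        unfold pvPop
        rw [List.find?_cons_of_pos (by simp), List.eraseP_cons_of_pos (by simp)]
        rfl
      rw [hpop]
      show ((t.map Prod.fst).filter q).foldl _ (acc ++ kv.2, t) = _
      rw [ih (acc ++ kv.2) (List.nodup_cons.mp hnd).2]
      rw [List.filter_cons, if_pos hq, List.filter_cons, if_neg (by simp [hq]),
        List.map_cons, List.flatten_cons, List.append_assoc]
    · rw [if_neg hq]
      have hnm : kv.1 ∉ (t.map Prod.fst).filter q :=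
        fun hmem => (List.nodup_cons.mp hnd).1 (List.mem_of_mem_filter hmem)
      rw [pv_fold_pop_cons _ kv t acc hnm, ih acc (List.nodup_cons.mp hnd).2]
      rw [List.filter_cons, if_neg hq, List.filter_cons, if_pos (by simp [hq])]

lemma pv_master (p : Int) (hp : 0 ≤ p) : ∀ (n : Nat) (l : List (String × List Int)),
    (l.map Prod.fst).Nodup → pvLC p l ≤ n → pvLoopA p n l = pvCore p l := by
  intro n
  induction n with
  | zero =>
    intro l _ hlc
    have hnil : l.filter (pvLongB p) = [] :=
      List.eq_nil_of_length_eq_zero (Nat.le_zero.mp hlc)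
    have h0 : ∀ kv ∈ l, pvLongB p kv = false := by
      intro kv hm
      cases h : pvLongB p kv
      · rfl
      · exact absurd (List.mem_filter.mpr ⟨hm, h⟩) (by simp [hnil])
    exact (pv_core_id p l h0).symm
  | succ n ih =>
    intro l hnd hlc
    by_cases hmax : p < pvMaxNodeLength (l.map Prod.fst)
    · obtain ⟨kv0, hm0, hl0⟩ := (pv_max_iff p hp l).mp hmax
      have hsome : ((l.map Prod.fst).find?
          (fun node => decide (p < PySem.Str.len node))).isSome := by
        rw [List.find?_isSome]
        exact ⟨kv0.1, List.mem_map_of_mem hm0, hl0⟩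
      obtain ⟨vk, hfind⟩ := Option.isSome_iff_exists.mp hsome
      obtain ⟨hvk, ks₁, ks₂, hks, hprev⟩ := List.find?_eq_some_iff_append.mp hfind
      obtain ⟨l₁, l₂', hl12, hm1, hm2⟩ := List.map_eq_append_iff.mp hks
      obtain ⟨kv, l₂, hcons, hkv1, hmap2⟩ := List.map_eq_cons_iff.mp hm2
      have hdec : l = l₁ ++ kv :: l₂ := by rw [hl12, hcons]
      have hkvlong : pvLongB p kv = true := by rw [pvLongB, hkv1]; exact hvk
      have h₁ : ∀ x ∈ l₁, pvLongB p x = false := by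
        intro x hx
        have := hprev x.1 (hm1 ▸ List.mem_map_of_mem hx)
        simpa [pvLongB] using this
      set g := pvPrefix p kv.1 with hgdef
      have hlong' : p < PySem.Str.len kv.1 := of_decide_eq_true hkvlong
      have hg : g.toList.length = p.toNat := pv_len_pfx p hp kv.1 (le_of_lt hlong')
      have hbody : pvLoopA p (n + 1) l = pvLoopA p n (pvStep p g l) := by
        show (if p < pvMaxNodeLength (l.map Prod.fst) then _ else l) = _
        rw [if_pos hmax, hfind]
        show pvLoopA p n
          ((((l.map Prod.fst).filter
              (fun nd => PySem.Str.startswith nd (PySem.Str.slice vk none (some p)))).foldl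
            (fun (st : List Int × List (String × List Int)) leaf =>
              let pr := pvPop st.2 leaf
              (st.1 ++ pr.1, pr.2)) ([], l)).2 ++
            [(PySem.Str.slice vk none (some p),
              (((l.map Prod.fst).filter
                (fun nd => PySem.Str.startswith nd (PySem.Str.slice vk none (some p)))).foldl
              (fun (st : List Int × List (String × List Int)) leaf =>
                let pr := pvPop st.2 leaf
                (st.1 ++ pr.1, pr.2)) ([], l)).1)]) = _
        have hgvk : PySem.Str.slice vk none (some p) = g := by
          rw [← hkv1]; exact hgdef.symm
        rw [hgvk, pv_fold_pop_filter _ l [] hnd, List.nil_append]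
        rfl
      rw [hbody]
      have hswkv : pvSwB p g kv = true := by
        rw [pv_sw_eq_bool p hp g hg, decide_eq_true (le_of_lt hlong'), hgdef]
        simp
      have hmem : kv ∈ l := by rw [hdec]; exact List.mem_append_right _ List.mem_cons_self
      rw [ih (pvStep p g l) (pv_nodup_step p hp g hg l hnd)
        (Nat.le_of_lt_succ (lt_of_lt_of_le (pv_lc_step p hp g hg l kv hmem hkvlong hswkv) hlc))]
      exact pv_core_step p hp l l₁ l₂ kv hdec h₁ hkvlong
    · have h0 : ∀ kv ∈ l, pvLongB p kv = false := by
        intro kv hm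
        cases h : pvLongB p kv
        · rfl
        · exact absurd ((pv_max_iff p hp l).mpr ⟨kv, hm, h⟩) hmax
      have : pvLoopA p (n + 1) l = l := by
        show (if p < pvMaxNodeLength (l.map Prod.fst) then _ else l) = l
        rw [if_neg hmax]
      rw [this]
      exact (pv_core_id p l h0).symm

theorem pv_final (tree_cat_dict : List (String × List Int)) (depth : Option Int)
    (hpre : Pre_trim2depth tree_cat_dict depth) :
    trim2depth tree_cat_dict depth = trim2depth_alt tree_cat_dict depth := by
  match depth with
  | none => rfl
  | some d =>
    have hp : (0 : Int) ≤ d + 1 := by have := hpre.2 d rfl; omega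
    show (if pvMaxNodeLength (tree_cat_dict.map Prod.fst) ≤ d + 1 then tree_cat_dict
      else pvLoopA (d + 1) tree_cat_dict.length tree_cat_dict) = _
    by_cases hmax : pvMaxNodeLength (tree_cat_dict.map Prod.fst) ≤ d + 1
    · rw [if_pos hmax]
      have hall : tree_cat_dict.all (fun kv => decide (PySem.Str.len kv.1 ≤ d + 1)) = true := by
        rw [List.all_eq_true]
        intro kv hm
        refine decide_eq_true ?_
        by_contra hc
        exact absurd ((pv_max_iff (d + 1) hp tree_cat_dict).mpr
          ⟨kv, hm, decide_eq_true (by omega)⟩) (by omega)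
      show _ = (if tree_cat_dict.all (fun kv => decide (PySem.Str.len kv.1 ≤ d + 1))
        then tree_cat_dict else _)
      rw [if_pos hall]
    · rw [if_neg hmax]
      have hlt : d + 1 < pvMaxNodeLength (tree_cat_dict.map Prod.fst) := lt_of_not_ge hmax
      obtain ⟨kv, hm, hl⟩ := (pv_max_iff (d + 1) hp tree_cat_dict).mp hlt
      have hall : tree_cat_dict.all (fun kv => decide (PySem.Str.len kv.1 ≤ d + 1)) = false := by
        rw [List.all_eq_false]
        exact ⟨kv, hm, by simpa using of_decide_eq_true hl⟩
      show _ = (if tree_cat_dict.all (fun kv => decide (PySem.Str.len kv.1 ≤ d + 1))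
        then tree_cat_dict
        else pvKeptB (d + 1) (pvOrderB (d + 1) tree_cat_dict) tree_cat_dict
          ++ (pvOrderB (d + 1) tree_cat_dict).map
            (fun g => (g, pvGroupB (d + 1) tree_cat_dict g)))
      rw [if_neg (by rw [hall]; exact Bool.false_ne_true)]
      rw [pv_master (d + 1) hp tree_cat_dict.length tree_cat_dict hpre.1
        (List.length_filter_le _ _)]
      rfl

-- ===== VERDICT (by name: the statement is the Claim_ definition above) =====
theorem trim2depth_spec : Claim_equal_trim2depth := by
  intro tree_cat_dict depth _ hpre
  show trim2depth tree_cat_dict depth = trim2depth_alt tree_cat_dict depth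
  exact pv_final tree_cat_dict depth hpre
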